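-- pv_equiv track=rewrite | github.com/esaul314/chunkify | pdf_chunker/passes/split_modules/footers.py | _trim_footer_suffix
-- ===== SOURCE A (Python) =====
-- def _trim_footer_suffix(text: str, suffix: tuple[str, ...]) -> str:
--     """Return text with trailing suffix bullet lines removed.
--
--     Carefully removes exactly the suffix lines from the end of text,
--     preserving all other content.
--
--     Args:
--         text: Original text
--         suffix: Lines to remove from the end
--
--     Returns:
--         Text with suffix removed
--     """
--     if not suffix:
--         return text
--     lines = text.splitlines()
--     if not lines:
--         return text
--
--     trimmed = list(lines)
--     suffix_lines = tuple(line.strip() for line in suffix if line.strip())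
--     if not suffix_lines:
--         return text
--
--     index = len(trimmed) - 1
--     for candidate in reversed(suffix_lines):
--         while index >= 0 and not trimmed[index].strip():
--             trimmed.pop()
--             index -= 1
--         if index < 0:
--             return text
--         if trimmed[index].strip() != candidate:
--             return text
--         trimmed.pop()
--         index -= 1
--
--     while trimmed and not trimmed[-1].strip():
--         trimmed.pop()
--
--     return "\n".join(trimmed)
-- ===== SOURCE B (Python) =====
-- def _trim_footer_suffix(text: str, suffix: tuple[str, ...]) -> str:
--     """Loop-free re-implementation: locate the indices of non-blank lines,
--     slice-compare the last k of them with the suffix, and cut with one slice."""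
--     if not suffix:
--         return text
--     lines = text.splitlines()
--     if not lines:
--         return text
--     suffix_lines = [line.strip() for line in suffix if line.strip()]
--     if not suffix_lines:
--         return text
--     nonblank = [i for i, line in enumerate(lines) if line.strip()]
--     k = len(suffix_lines)
--     if len(nonblank) < k:
--         return text
--     sel = nonblank[-k:]
--     if [lines[i].strip() for i in sel] != suffix_lines:
--         return text
--     m = len(nonblank) - k
--     trimmed = lines[: nonblank[m - 1] + 1] if m else []
--     return "\n".join(trimmed)
-- ===== Notes on version B (the rewrite author's own statement) =====
-- stated objective: alternative
-- what changed: Replaces A's backwards pop-and-match loop (skip blanks, compare, pop, repeat, then a trailing-blank-strip loop) by a loop-free formulation: collect the indices of non-blank lines once, slice-compare the last k of them with the suffix, and cut with a single slice at the previous non-blank index.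
import Mathlib
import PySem

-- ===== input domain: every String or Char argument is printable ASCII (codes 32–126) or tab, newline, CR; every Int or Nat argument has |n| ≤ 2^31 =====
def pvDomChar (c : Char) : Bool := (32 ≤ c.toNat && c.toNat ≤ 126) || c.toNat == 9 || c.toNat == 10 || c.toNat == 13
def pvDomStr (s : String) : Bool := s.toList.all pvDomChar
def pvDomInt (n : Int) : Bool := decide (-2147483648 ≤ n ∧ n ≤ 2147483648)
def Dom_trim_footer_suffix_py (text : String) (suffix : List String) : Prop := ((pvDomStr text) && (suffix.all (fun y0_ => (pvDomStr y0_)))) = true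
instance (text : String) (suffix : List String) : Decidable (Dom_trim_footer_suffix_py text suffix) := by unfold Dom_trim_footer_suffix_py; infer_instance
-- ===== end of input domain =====

-- B replaces A's backwards pop-and-match loops by a loop-free index/slice formulation (alternative decomposition, same cost).

-- ===== PORT A =====
-- while index >= 0 and not trimmed[index].strip(): trimmed.pop(); index -= 1
def pvSkipBlanks (trimmed : List String) (index : Int) : List String × Int :=
  if 0 ≤ index ∧ PySem.Str.strip (PySem.List.pyGetD trimmed index "") = "" then
    pvSkipBlanks trimmed.dropLast (index - 1)
  else (trimmed, index)
termination_by (index + 1).toNat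
decreasing_by omega

-- for candidate in reversed(suffix_lines): …  (none = "return text")
def pvALoop : List String → List String → Int → Option (List String × Int)
  | [], trimmed, index => some (trimmed, index)
  | c :: rest, trimmed, index =>
    let s := pvSkipBlanks trimmed index
    if s.2 < 0 then none
    else if PySem.Str.strip (PySem.List.pyGetD s.1 s.2 "") ≠ c then none
    else pvALoop rest s.1.dropLast (s.2 - 1)

-- while trimmed and not trimmed[-1].strip(): trimmed.pop()
def pvPopTrailing (trimmed : List String) : List String :=
  if trimmed ≠ [] ∧ PySem.Str.strip (PySem.List.pyGetD trimmed (-1) "") = "" then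
    pvPopTrailing trimmed.dropLast
  else trimmed
termination_by trimmed.length
decreasing_by
  rename_i h
  have : trimmed ≠ [] := h.1
  have : 0 < trimmed.length := List.length_pos_iff.mpr this
  simp [List.length_dropLast]; omega

def trim_footer_suffix_py (text : String) (suffix : List String) : String :=
  if suffix = [] then text else
  let lines := PySem.Str.splitlines text
  if lines = [] then text else
  let trimmed := lines
  let suffix_lines := (suffix.filter (fun l => PySem.Str.strip l ≠ "")).map PySem.Str.strip
  if suffix_lines = [] then text else
  match pvALoop suffix_lines.reverse trimmed ((trimmed.length : Int) - 1) with
  | none => text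
  | some (t, _) => PySem.Str.join "\n" (pvPopTrailing t)

-- ===== PORT B =====
def trim_footer_suffix_py_alt (text : String) (suffix : List String) : String :=
  if suffix = [] then text else
  let lines := PySem.Str.splitlines text
  if lines = [] then text else
  let suffix_lines := (suffix.filter (fun l => PySem.Str.strip l ≠ "")).map PySem.Str.strip
  if suffix_lines = [] then text else
  let nonblank := ((PySem.List.enumerate lines 0).filter (fun p => PySem.Str.strip p.2 ≠ "")).map Prod.fst
  let k := suffix_lines.length
  if nonblank.length < k then text else
  let sel := PySem.List.slice nonblank (some (-(k : Int))) none
  if sel.map (fun i => PySem.Str.strip (PySem.List.pyGetD lines i "")) ≠ suffix_lines then text else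
  let m := nonblank.length - k
  let trimmed := if m ≠ 0 then PySem.List.slice lines none (some (PySem.List.pyGetD nonblank ((m : Int) - 1) 0 + 1)) else []
  PySem.Str.join "\n" trimmed

-- ===== PRECONDITION & SPEC =====
def Spec_trim_footer_suffix_py (text : String) (suffix : List String) (out : String) : Prop := out = trim_footer_suffix_py_alt text suffix
instance (text : String) (suffix : List String) (out : String) : Decidable (Spec_trim_footer_suffix_py text suffix out) := by unfold Spec_trim_footer_suffix_py; infer_instance

-- ===== CLAIM (what is proved, stated in full; the proofs are below) =====
def Claim_equal_trim_footer_suffix_py : Prop := ∀ (text : String) (suffix : List String), Dom_trim_footer_suffix_py text suffix → Spec_trim_footer_suffix_py text suffix (trim_footer_suffix_py text suffix)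

-- ===== LEMMAS AND PROOFS =====

def pvF (t : List String) (i : Nat) : String := PySem.Str.strip (t.getD i "")

def pvNbL (t : List String) : List Nat := (List.range t.length).filter (fun i => pvF t i ≠ "")

lemma pvF_take {t : List String} {m i : Nat} (h : i < m) : pvF (t.take m) i = pvF t i := by
  simp [pvF, List.getD, h]

lemma range_filter_lt (n m : Nat) (h : m ≤ n) :
    (List.range n).filter (fun i => decide (i < m)) = List.range m := by
  have : n = m + (n - m) := by omega
  rw [this, List.range_add, List.filter_append]
  rw [List.filter_eq_self.2 (by intro a ha; simp [List.mem_range] at ha ⊢; omega),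
      List.filter_eq_nil_iff.2 (by intro a ha; simp [List.mem_range] at ha ⊢; omega)]
  simp

lemma pvNbL_take (t : List String) (m : Nat) (h : m ≤ t.length) :
    pvNbL (t.take m) = (pvNbL t).filter (fun i => i < m) := by
  unfold pvNbL
  rw [List.length_take, min_eq_left h]
  rw [List.filter_filter]
  have h1 : (List.range m).filter (fun i => pvF (t.take m) i ≠ "") =
      (List.range m).filter (fun i => pvF t i ≠ "") := by
    apply List.filter_congr
    intro i hi
    rw [pvF_take (List.mem_range.1 hi)]
  rw [h1, ← List.filter_filter, List.filter_comm, range_filter_lt _ _ h]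

lemma pvNbL_mem {t : List String} {i : Nat} (h : i ∈ pvNbL t) : i < t.length ∧ pvF t i ≠ "" := by
  unfold pvNbL at h
  simp only [List.mem_filter, List.mem_range] at h
  exact ⟨h.1, by simpa using h.2⟩

lemma pvNbL_sorted (t : List String) : (pvNbL t).Pairwise (· < ·) :=
  (List.pairwise_lt_range).filter _

lemma pvNbL_append (t : List String) (x : String) :
    pvNbL (t ++ [x]) = pvNbL t ++ (if PySem.Str.strip x ≠ "" then [t.length] else []) := by
  unfold pvNbL
  rw [List.length_append, List.length_singleton, List.range_succ, List.filter_append]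
  congr 1
  · apply List.filter_congr
    intro i hi
    have hi' := List.mem_range.1 hi
    simp [pvF, List.getD, List.getElem?_append_left hi']
  · have : pvF (t ++ [x]) t.length = PySem.Str.strip x := by
      simp [pvF, List.getD]
    simp
    split <;> simp_all

lemma sorted_filter_lt (l : List Nat) (hs : l.Pairwise (· < ·)) (j : Nat) (hj : j < l.length) :
    l.filter (fun i => i < l[j]) = l.take j := by
  have hmono : ∀ p q (hp : p < l.length) (hq : q < l.length), p < q → l[p] < l[q] :=
    fun p q hp hq hpq => List.pairwise_iff_getElem.1 hs p q hp hq hpq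
  set v := l[j] with hv
  nth_rewrite 1 [← List.take_append_drop j l]
  rw [List.filter_append]
  rw [List.filter_eq_self.2 ?_, List.filter_eq_nil_iff.2 ?_, List.append_nil]
  · intro a ha
    obtain ⟨i, hi, rfl⟩ := List.getElem_of_mem ha
    rw [List.getElem_drop]
    simp only [hv, decide_eq_true_eq]
    have := hi; simp [List.length_drop] at this
    have : l[j] ≤ l[j + i] := by
      rcases Nat.eq_zero_or_pos i with h0 | h0
      · subst h0; simp
      · exact le_of_lt (hmono j (j+i) hj (by omega) (by omega))
    simp; omega
  · intro a ha
    obtain ⟨i, hi, rfl⟩ := List.getElem_of_mem ha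
    have hij : i < j := by
      have := hi; simp [List.length_take] at this; omega
    rw [List.getElem_take]
    simp only [hv, decide_eq_true_eq]
    exact hmono i j (by omega) hj hij
-- while index >= 0 and not trimmed[index].strip(): trimmed.pop(); index -= 1

lemma pop_spec (t : List String) :
    pvPopTrailing t = (match (pvNbL t).getLast? with | none => [] | some j => t.take (j+1)) := by
  induction t using List.reverseRecOn with
  | nil => rw [pvPopTrailing]; simp [pvNbL]
  | append_singleton t x ih =>
    rw [pvPopTrailing]
    rw [pvNbL_append]
    by_cases hx : PySem.Str.strip x = ""
    · simp [hx, PySem.List.pyGetD_neg_one_append_singleton, ih]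
      cases hl : (pvNbL t).getLast? with
      | none => rfl
      | some j =>
        have hj := (pvNbL_mem (List.mem_of_getLast? hl)).1
        simp [List.take_append_of_le_length (by omega : j + 1 ≤ t.length)]
    · simp [hx, PySem.List.pyGetD_neg_one_append_singleton]

lemma skip_spec (t : List String) :
    pvSkipBlanks t ((t.length : Int) - 1) =
      (pvPopTrailing t, ((pvPopTrailing t).length : Int) - 1) := by
  induction t using List.reverseRecOn with
  | nil => rw [pvSkipBlanks, pvPopTrailing]; simp
  | append_singleton t x ih =>
    rw [pvSkipBlanks, pvPopTrailing]
    have hlen : ((t ++ [x]).length : Int) - 1 = (t.length : Int) := by simp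
    have hget : PySem.List.pyGetD (t ++ [x]) ((t.length : Int)) "" = x := by
      rw [PySem.List.pyGetD_natCast]
      simp [List.getD, List.getElem?_append_right (le_refl t.length)]
    by_cases hx : PySem.Str.strip x = ""
    · simp only [hlen, hget]
      simp [hx, PySem.List.pyGetD_neg_one_append_singleton, ih]
    · simp only [hlen, hget]
      simp [hx, PySem.List.pyGetD_neg_one_append_singleton]

lemma aloop_spec (cands : List String) : ∀ (t : List String),
    (pvALoop cands t ((t.length : Int) - 1)).map (fun s => pvPopTrailing s.1) =
      (if cands.length ≤ (pvNbL t).length ∧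
          (((pvNbL t).drop ((pvNbL t).length - cands.length)).map (fun i => pvF t i)).reverse = cands
       then some (match ((pvNbL t).take ((pvNbL t).length - cands.length)).getLast? with
                  | none => ([] : List String)
                  | some j => t.take (j+1))
       else none) := by
  induction cands with
  | nil =>
    intro t
    rw [if_pos ⟨Nat.zero_le _, by simp⟩]
    simp [pvALoop, pop_spec]
  | cons c rest ih =>
    intro t
    rw [pvALoop]
    rw [skip_spec]
    by_cases h0 : pvNbL t = []
    · have hu : pvPopTrailing t = [] := by rw [pop_spec, h0]; rfl
      simp only [hu, List.length_nil, Nat.cast_zero, zero_sub]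
      norm_num
      intro h1 _
      rw [h0] at h1
      simp at h1
    · -- nb ≠ []
      have hj₀last : (pvNbL t).getLast? = some ((pvNbL t).getLast h0) := List.getLast?_eq_some_getLast _
      set j₀ := (pvNbL t).getLast h0 with hj₀def
      have hjmem : j₀ ∈ pvNbL t := List.getLast_mem h0
      have hjlen : j₀ < t.length := (pvNbL_mem hjmem).1
      have hu : pvPopTrailing t = t.take (j₀ + 1) := by rw [pop_spec, hj₀last]
      have hulen : (pvPopTrailing t).length = j₀ + 1 := by
        rw [hu, List.length_take]; omega
      have hs2 : ((pvPopTrailing t).length : Int) - 1 = (j₀ : Int) := by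
        rw [hulen]; push_cast; ring
      have hgetu : PySem.Str.strip (PySem.List.pyGetD (pvPopTrailing t) ((j₀ : Int)) "") = pvF t j₀ := by
        rw [hu, PySem.List.pyGetD_natCast, pvF]
        congr 1
        simp [List.getD]
      have hdropu : (pvPopTrailing t).dropLast = t.take j₀ := by
        rw [hu, List.dropLast_eq_take, List.length_take, List.take_take]
        congr 1
        omega
      have hnb' : pvNbL (t.take j₀) = (pvNbL t).dropLast := by
        rw [pvNbL_take t j₀ (le_of_lt hjlen)]
        have hlt1 : (pvNbL t).length - 1 < (pvNbL t).length := by have := List.length_pos_iff.2 h0; omega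
        have hgl : j₀ = (pvNbL t)[(pvNbL t).length - 1] := by
          rw [hj₀def, List.getLast_eq_getElem]
        rw [List.dropLast_eq_take]
        calc (pvNbL t).filter (fun i => i < j₀)
            = (pvNbL t).filter (fun i => i < (pvNbL t)[(pvNbL t).length - 1]) := by rw [← hgl]
          _ = (pvNbL t).take ((pvNbL t).length - 1) := sorted_filter_lt _ (pvNbL_sorted t) _ hlt1
      have hlt' : ∀ i ∈ (pvNbL t).dropLast, i < j₀ := by
        intro i hi
        have hsp := pvNbL_sorted t
        rw [← List.dropLast_append_getLast h0] at hsp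
        have := (List.pairwise_append.1 hsp).2.2 i hi j₀ (by simp [hj₀def])
        exact this
      have ht1len : ((t.take j₀).length : Int) = (j₀ : Int) := by
        rw [List.length_take]; push_cast [min_eq_left (le_of_lt hjlen)]; ring
      have hn1 : 1 ≤ (pvNbL t).length := List.length_pos_iff.2 h0
      simp only [hs2, hgetu, hdropu]
      rw [if_neg (by exact not_lt.2 (Int.natCast_nonneg j₀))]
      have hdeq : rest.length + 1 ≤ (pvNbL t).length →
          (pvNbL t).drop ((pvNbL t).length - (rest.length + 1)) =
            (pvNbL t).dropLast.drop ((pvNbL t).dropLast.length - rest.length) ++ [j₀] := by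
        intro hk
        conv_lhs => rw [← List.dropLast_append_getLast h0]
        rw [List.drop_append_of_le_length (by simp only [List.length_append, List.length_dropLast, List.length_cons, List.length_nil]; omega)]
        congr 2
        simp only [List.length_append, List.length_dropLast, List.length_cons, List.length_nil]
        omega
      by_cases hc : pvF t j₀ = c
      · simp only [hc, ne_eq, not_true_eq_false, if_false]
        rw [show ((j₀ : Int) - 1) = ((List.take j₀ t).length : Int) - 1 by rw [ht1len]]
        rw [ih (t.take j₀)]
        by_cases hk : rest.length + 1 ≤ (pvNbL t).length
        · have hteq : (pvNbL t).take ((pvNbL t).length - (rest.length + 1)) =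
              (pvNbL t).dropLast.take ((pvNbL t).dropLast.length - rest.length) := by
            conv_lhs => rw [← List.dropLast_append_getLast h0]
            rw [List.take_append_of_le_length (by simp only [List.length_append, List.length_dropLast, List.length_cons, List.length_nil]; omega)]
            congr 1
            simp only [List.length_append, List.length_dropLast, List.length_cons, List.length_nil]
            omega
          simp only [List.length_cons]
          rw [hdeq hk, hteq, hnb']
          rw [List.map_append, List.reverse_append]
          simp only [List.map_cons, List.map_nil, List.reverse_cons, List.reverse_nil,
            List.nil_append, List.cons_append, hc]
          have hmap : List.map (fun i => pvF (List.take j₀ t) i)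
                (List.drop ((pvNbL t).dropLast.length - rest.length) (pvNbL t).dropLast)
              = List.map (fun i => pvF t i)
                (List.drop ((pvNbL t).dropLast.length - rest.length) (pvNbL t).dropLast) :=
            List.map_congr_left fun i hi => pvF_take (hlt' i (List.mem_of_mem_drop hi))
          rw [hmap]
          apply if_congr
          · constructor
            · rintro ⟨h1, h2⟩
              refine ⟨?_, by rw [h2]⟩
              rw [List.length_dropLast] at h1
              omega
            · rintro ⟨h1, h2⟩
              exact ⟨by rw [List.length_dropLast]; omega, by exact (List.cons_eq_cons.1 h2).2⟩
          · cases hgl2 : (List.take ((pvNbL t).dropLast.length - rest.length) (pvNbL t).dropLast).getLast? with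
            | none => rfl
            | some j =>
              have hjmem2 : j ∈ (pvNbL t).dropLast :=
                List.mem_of_mem_take (List.mem_of_getLast? hgl2)
              have hjj : j < j₀ := hlt' j hjmem2
              show some (List.take (j + 1) (List.take j₀ t)) = some (List.take (j + 1) t)
              rw [List.take_take, min_eq_left (Nat.succ_le_of_lt hjj)]
          · rfl
        · have hinner : ¬ (rest.length ≤ (pvNbL (List.take j₀ t)).length ∧
              (List.map (fun i => pvF (List.take j₀ t) i)
                (List.drop ((pvNbL (List.take j₀ t)).length - rest.length) (pvNbL (List.take j₀ t)))).reverse = rest) := by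
            rintro ⟨h1, -⟩
            rw [hnb', List.length_dropLast] at h1
            omega
          have houter : ¬ ((c :: rest).length ≤ (pvNbL t).length ∧
              (List.map (fun i => pvF t i) (List.drop ((pvNbL t).length - (c :: rest).length) (pvNbL t))).reverse = c :: rest) := by
            rintro ⟨h1, -⟩
            simp only [List.length_cons] at h1
            exact hk h1
          rw [if_neg hinner, if_neg houter]
      · rw [if_pos (by simpa using hc)]
        rw [if_neg ?_]
        · rfl
        rintro ⟨h1, h2⟩
        simp only [List.length_cons] at h1
        simp only [List.length_cons] at h2
        rw [hdeq h1, List.map_append, List.reverse_append] at h2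
        simp only [List.map_cons, List.map_nil, List.reverse_cons, List.reverse_nil,
          List.nil_append, List.cons_append, List.cons.injEq] at h2
        exact hc h2.1

lemma pvNbL_cons (x : String) (L : List String) :
    pvNbL (x :: L) = (if PySem.Str.strip x ≠ "" then [0] else []) ++ (pvNbL L).map (· + 1) := by
  unfold pvNbL
  rw [List.length_cons, List.range_succ_eq_map, List.filter_cons]
  have h0 : pvF (x :: L) 0 = PySem.Str.strip x := rfl
  have hists : (List.map Nat.succ (List.range L.length)).filter (fun i => pvF (x :: L) i ≠ "") =
      ((List.range L.length).filter (fun i => pvF L i ≠ "")).map Nat.succ := by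
    rw [List.filter_map]
    congr 1
  rw [hists, h0]
  by_cases hx : PySem.Str.strip x = "" <;> simp [hx]

lemma enumE (L : List String) : ∀ (s : Int),
    ((PySem.List.enumerate L s).filter (fun p => PySem.Str.strip p.2 ≠ "")).map Prod.fst =
      (pvNbL L).map (fun i : Nat => s + (i : Int)) := by
  induction L with
  | nil => intro s; simp [PySem.List.enumerate_nil, pvNbL]
  | cons x L ih =>
    intro s
    rw [PySem.List.enumerate_cons, List.filter_cons, pvNbL_cons]
    have hmm : ((pvNbL L).map (· + 1)).map (fun i : Nat => s + (i : Int)) =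
        (pvNbL L).map (fun i : Nat => (s + 1) + (i : Int)) := by
      rw [List.map_map]
      apply List.map_congr_left
      intro i _
      show s + ((i + 1 : Nat) : Int) = (s + 1) + (i : Int)
      push_cast; ring
    by_cases hx : PySem.Str.strip x = ""
    · simp only [hx, ne_eq, not_true_eq_false, decide_false, Bool.false_eq_true, if_false,
        List.nil_append]
      simp only [ne_eq] at ih
      rw [ih (s + 1)]
      exact hmm.symm
    · simp only [hx, ne_eq, not_false_eq_true, decide_true, if_true, List.cons_append,
        List.nil_append, List.map_cons]
      simp only [ne_eq] at ih
      rw [ih (s + 1)]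
      refine congrArg₂ _ (by simp) hmm.symm

theorem final_eq (text : String) (suffix : List String) :
    trim_footer_suffix_py text suffix = trim_footer_suffix_py_alt text suffix := by
  unfold trim_footer_suffix_py trim_footer_suffix_py_alt
  by_cases hsuf : suffix = []
  · simp [hsuf]
  simp only [hsuf, if_false]
  by_cases hlines : PySem.Str.splitlines text = []
  · simp [hlines]
  simp only [hlines, if_false]
  set lines := PySem.Str.splitlines text with hldef
  set sl := (suffix.filter (fun l => PySem.Str.strip l ≠ "")).map PySem.Str.strip with hsldef
  by_cases hsl0 : sl = []
  · simp [hsl0]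
  simp only [hsl0, if_false]
  have hnbI : (List.map Prod.fst
      (List.filter (fun p => decide (PySem.Str.strip p.2 ≠ "")) (PySem.List.enumerate lines))) =
      (pvNbL lines).map (fun i : Nat => (i : Int)) := by
    have h := enumE lines 0
    simpa using h
  rw [hnbI]
  simp only [List.length_map]
  have hk1 : 0 < sl.length := List.length_pos_iff.2 hsl0
  have hsel : PySem.List.slice ((pvNbL lines).map (fun i : Nat => (i : Int)))
      (some (-(sl.length : Int))) none =
      ((pvNbL lines).drop ((pvNbL lines).length - sl.length)).map (fun i : Nat => (i : Int)) := by
    rw [PySem.List.slice_from_neg_natCast _ _ hk1, List.length_map, ← List.map_drop]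
  rw [hsel]
  have hselmap : (((pvNbL lines).drop ((pvNbL lines).length - sl.length)).map
        (fun i : Nat => (i : Int))).map (fun i => PySem.Str.strip (PySem.List.pyGetD lines i "")) =
      ((pvNbL lines).drop ((pvNbL lines).length - sl.length)).map (fun i => pvF lines i) := by
    rw [List.map_map]
    apply List.map_congr_left
    intro i _
    simp [Function.comp, pvF]
  rw [hselmap]
  have hA := aloop_spec sl.reverse lines
  simp only [List.length_reverse] at hA
  by_cases hkn : (pvNbL lines).length < sl.length
  · rw [if_pos hkn]
    rw [if_neg (by rintro ⟨h1, -⟩; omega : ¬ (sl.length ≤ (pvNbL lines).length ∧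
      (((pvNbL lines).drop ((pvNbL lines).length - sl.length)).map
        (fun i => pvF lines i)).reverse = sl.reverse))] at hA
    rcases hx : pvALoop sl.reverse lines ((lines.length : Int) - 1) with _ | pr
    · rfl
    · rw [hx] at hA; simp at hA
  · rw [if_neg hkn]
    by_cases hmatch : ((pvNbL lines).drop ((pvNbL lines).length - sl.length)).map
        (fun i => pvF lines i) = sl
    · rw [if_neg (not_not_intro hmatch)]
      rw [if_pos ⟨le_of_not_gt hkn, by rw [hmatch]⟩] at hA
      rcases hx : pvALoop sl.reverse lines ((lines.length : Int) - 1) with _ | pr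
      · rw [hx] at hA; simp at hA
      · rw [hx] at hA
        simp only [Option.map_some, Option.some.injEq] at hA
        obtain ⟨t, i⟩ := pr
        simp only at hA
        show PySem.Str.join "\n" (pvPopTrailing t) = _
        rw [hA]
        congr 1
        by_cases hm : (pvNbL lines).length - sl.length = 0
        · rw [if_neg (not_not_intro hm)]
          rw [hm]
          rfl
        · rw [if_pos hm]
          set m := (pvNbL lines).length - sl.length with hmdef
          have hmn : m ≤ (pvNbL lines).length := by omega
          have hm1 : m - 1 < (pvNbL lines).length := by omega
          have hcast : ((m : Int) - 1) = ((m - 1 : Nat) : Int) := by omega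
          rw [hcast, PySem.List.pyGetD_natCast]
          rw [List.getD_eq_getElem _ _ (by rw [List.length_map]; omega)]
          rw [List.getElem_map]
          have hc2 : ((((pvNbL lines)[m-1] : Nat) : Int) + 1) = (((pvNbL lines)[m-1] + 1 : Nat) : Int) := by push_cast; ring
          rw [hc2, PySem.List.slice_to_natCast]
          have hgl : ((pvNbL lines).take m).getLast? = some ((pvNbL lines)[m-1]) := by
            rw [List.getLast?_eq_getElem?, List.length_take, min_eq_left hmn]
            rw [List.getElem?_take, if_pos (by omega)]
            exact List.getElem?_eq_getElem hm1
          rw [hgl]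
    · rw [if_pos hmatch]
      rw [if_neg (by rintro ⟨-, h2⟩; exact hmatch (List.reverse_inj.1 h2) : ¬ (sl.length ≤ (pvNbL lines).length ∧
        (((pvNbL lines).drop ((pvNbL lines).length - sl.length)).map
          (fun i => pvF lines i)).reverse = sl.reverse))] at hA
      rcases hx : pvALoop sl.reverse lines ((lines.length : Int) - 1) with _ | pr
      · rfl
      · rw [hx] at hA; simp at hA


-- ===== VERDICT (by name: the statement is the Claim_ definition above) =====
theorem trim_footer_suffix_py_spec : Claim_equal_trim_footer_suffix_py := by
  intro text suffix _
  exact final_eq text suffix
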